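-- pv_equiv track=rewrite | github.com/nermadie/CodeForces_Solutions | CodeforcesRound908Div2/prob01.py | determine_game_winner
-- ===== SOURCE A (Python) =====
-- def determine_game_winner(n, plays):
--     for i in range(1, n + 1):
--         countAwin = 0
--         countBwin = 0
--         countA = 0
--         countB = 0
--         for j in range(n):
--             if plays[j] == "A":
--                 countA += 1
--                 if countA == i:
--                     countAwin += 1
--                     countA = 0
--                     countB = 0
--             else:
--                 countB += 1
--                 if countB == i:
--                     countBwin += 1
--                     countA = 0
--                     countB = 0
--         if countA == 0 and countB == 0:
--             if countAwin > countBwin and plays[-1] == "A":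
--                 return "A"
--             elif countBwin > countAwin and plays[-1] == "B":
--                 return "B"
--     return "?"
-- ===== SOURCE B (Python) =====
-- def determine_game_winner(n, plays):
--     # Per candidate length i, decompose the prefix into rounds recursively:
--     # split off one complete round at a time instead of keeping reset-counters
--     # across a flat indexed scan.
--     def split_round(i, s):
--         a = b = 0
--         for k, c in enumerate(s):
--             if c == "A":
--                 a += 1
--                 if a == i:
--                     return True, s[k + 1:]
--             else:
--                 b += 1
--                 if b == i:
--                     return False, s[k + 1:]
--         return None
--
--     for i in range(1, n + 1):
--         rest = plays[:n]
--         wa = wb = 0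
--         complete = True
--         while rest:
--             r = split_round(i, rest)
--             if r is None:
--                 complete = False
--                 break
--             won_a, rest = r
--             if won_a:
--                 wa += 1
--             else:
--                 wb += 1
--         if complete:
--             if wa > wb and plays[-1] == "A":
--                 return "A"
--             if wb > wa and plays[-1] == "B":
--                 return "B"
--     return "?"
-- ===== Notes on version B (the rewrite author's own statement) =====
-- stated objective: alternative
-- what changed: A keeps four reset-on-round-end counters across one flat indexed scan per candidate length; B recursively decomposes the prefix into complete rounds (a helper splits off one round and returns its winner plus the remaining suffix) and counts round winners, with no cross-round counter state.
import Mathlib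
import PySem

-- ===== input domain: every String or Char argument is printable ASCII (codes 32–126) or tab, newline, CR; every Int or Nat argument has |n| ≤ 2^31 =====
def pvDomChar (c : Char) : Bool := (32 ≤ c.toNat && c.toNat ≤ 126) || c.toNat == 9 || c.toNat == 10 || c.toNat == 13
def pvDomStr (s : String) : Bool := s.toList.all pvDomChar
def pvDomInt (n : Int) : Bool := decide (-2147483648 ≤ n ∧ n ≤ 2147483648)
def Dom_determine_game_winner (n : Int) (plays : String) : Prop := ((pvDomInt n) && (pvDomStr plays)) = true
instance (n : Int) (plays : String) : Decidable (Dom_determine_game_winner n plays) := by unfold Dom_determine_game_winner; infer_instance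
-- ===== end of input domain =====

-- B re-implements A's per-candidate flat counter scan as a recursive decomposition
-- of the prefix into complete rounds (objective: alternative; same return values).

-- ===== PORT A =====
-- inner loop body: one character step on the state (countAwin, countBwin, countA, countB)
def pvStepC (i : Int) (s : Int × Int × Int × Int) (c : Char) : Int × Int × Int × Int :=
  let (wa, wb, a, b) := s
  if c = 'A' then
    if a + 1 = i then (wa + 1, wb, 0, 0) else (wa, wb, a + 1, b)
  else
    if b + 1 = i then (wa, wb + 1, 0, 0) else (wa, wb, a, b + 1)

-- outer 'for i in range(1, n+1)' with early return
def pvLoopA (plays : String) (n : Int) : List Int → String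
  | [] => "?"
  | i :: is =>
    let r := (PySem.List.pyRange 0 n 1).foldl
      (fun s j => pvStepC i s (PySem.List.pyGetD plays.toList j ' ')) (0, 0, 0, 0)
    if r.2.2.1 = 0 ∧ r.2.2.2 = 0 then
      if r.1 > r.2.1 ∧ PySem.List.pyGetD plays.toList (-1) ' ' = 'A' then "A"
      else if r.2.1 > r.1 ∧ PySem.List.pyGetD plays.toList (-1) ' ' = 'B' then "B"
      else pvLoopA plays n is
    else pvLoopA plays n is

def determine_game_winner (n : Int) (plays : String) : String :=
  pvLoopA plays n (PySem.List.pyRange 1 (n + 1) 1)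

-- ===== PORT B =====
-- split_round: consume one round, return (winner-is-A, rest); none = list exhausted mid-round
def pvSplitRound (i : Int) : List Char → Int → Int → Option (Bool × List Char)
  | [], _, _ => none
  | c :: t, a, b =>
    if c = 'A' then
      if a + 1 = i then some (true, t) else pvSplitRound i t (a + 1) b
    else
      if b + 1 = i then some (false, t) else pvSplitRound i t a (b + 1)

theorem pvSplitRound_length (i : Int) : ∀ (s : List Char) (a b : Int) (w : Bool) (t : List Char),
    pvSplitRound i s a b = some (w, t) → t.length < s.length := by
  intro s
  induction s with
  | nil => intro a b w t h; simp [pvSplitRound] at h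
  | cons c cs ih =>
    intro a b w t h
    simp only [pvSplitRound] at h
    split_ifs at h with h1 h2 h3
    · simp only [Option.some.injEq, Prod.mk.injEq] at h; rcases h with ⟨-, rfl⟩; simp
    · exact Nat.lt_trans (ih _ _ _ _ h) (by simp)
    · simp only [Option.some.injEq, Prod.mk.injEq] at h; rcases h with ⟨-, rfl⟩; simp
    · exact Nat.lt_trans (ih _ _ _ _ h) (by simp)

-- the 'while rest:' loop counting round winners; none = incomplete final round
def pvRoundsB (i : Int) (rest : List Char) (wa wb : Int) : Option (Int × Int) :=
  if rest = [] then some (wa, wb)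
  else
    match h2 : pvSplitRound i rest 0 0 with
    | none => none
    | some (true, t) => pvRoundsB i t (wa + 1) wb
    | some (false, t) => pvRoundsB i t wa (wb + 1)
termination_by rest.length
decreasing_by
  · exact pvSplitRound_length i rest 0 0 true t h2
  · exact pvSplitRound_length i rest 0 0 false t h2

def pvLoopB (plays : String) (n : Int) : List Int → String
  | [] => "?"
  | i :: is =>
    match pvRoundsB i (PySem.List.slice plays.toList none (some n)) 0 0 with
    | none => pvLoopB plays n is
    | some (wa, wb) =>
      if wa > wb ∧ PySem.List.pyGetD plays.toList (-1) ' ' = 'A' then "A"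
      else if wb > wa ∧ PySem.List.pyGetD plays.toList (-1) ' ' = 'B' then "B"
      else pvLoopB plays n is

def determine_game_winner_alt (n : Int) (plays : String) : String :=
  pvLoopB plays n (PySem.List.pyRange 1 (n + 1) 1)

-- ===== PRECONDITION & SPEC =====
-- Pre_ excludes exactly the inputs where A raises IndexError: n larger than len(plays).
def Pre_determine_game_winner (n : Int) (plays : String) : Prop :=
  n ≤ (plays.toList.length : Int)
instance (n : Int) (plays : String) : Decidable (Pre_determine_game_winner n plays) := by
  unfold Pre_determine_game_winner; infer_instance

def pvWitness_determine_game_winner : Int × String := (2, "AB")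

def Spec_determine_game_winner (n : Int) (plays : String) (out : String) : Prop :=
  out = determine_game_winner_alt n plays
instance (n : Int) (plays : String) (out : String) : Decidable (Spec_determine_game_winner n plays out) := by
  unfold Spec_determine_game_winner; infer_instance

-- ===== CLAIM (what is proved, stated in full; the proofs are below) =====
def Claim_equal_determine_game_winner : Prop := ∀ (n : Int) (plays : String), Dom_determine_game_winner n plays → Pre_determine_game_winner n plays → Spec_determine_game_winner n plays (determine_game_winner n plays)

-- ===== LEMMAS AND PROOFS =====

def pvCntA (l : List Char) : Int := (l.countP (fun c => c = 'A') : Int)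
def pvCntB (l : List Char) : Int := (l.countP (fun c => ¬ (c = 'A')) : Int)

theorem pvCnt_total (l : List Char) : pvCntA l + pvCntB l = (l.length : Int) := by
  unfold pvCntA pvCntB
  rw [← Nat.cast_add]
  norm_cast
  rw [List.length_eq_countP_add_countP (fun c => decide (c = 'A'))]
  congr 1
  apply List.countP_congr
  intro c _
  simp

-- one chunk of A's flat scan = split-off of one round (or leftover counts)
theorem pvFold_split (i : Int) : ∀ (l : List Char) (wa wb a b : Int), a + 1 ≤ i → b + 1 ≤ i →
    l.foldl (pvStepC i) (wa, wb, a, b) =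
      match pvSplitRound i l a b with
      | some (true, t) => t.foldl (pvStepC i) (wa + 1, wb, 0, 0)
      | some (false, t) => t.foldl (pvStepC i) (wa, wb + 1, 0, 0)
      | none => (wa, wb, a + pvCntA l, b + pvCntB l) := by
  intro l
  induction l with
  | nil => intro wa wb a b ha hb; simp [pvSplitRound, pvCntA, pvCntB]
  | cons c cs ih =>
    intro wa wb a b ha hb
    by_cases hc : c = 'A'
    · by_cases hi : a + 1 = i
      · simp [pvSplitRound, hc, hi, pvStepC]
      · have hstep : pvStepC i (wa, wb, a, b) c = (wa, wb, a + 1, b) := by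
          simp [pvStepC, hc, hi]
        have hsr : pvSplitRound i (c :: cs) a b = pvSplitRound i cs (a + 1) b := by
          simp [pvSplitRound, hc, hi]
        have hrec := ih wa wb (a + 1) b (by omega) hb
        rw [List.foldl_cons, hstep, hsr, hrec]
        cases h2 : pvSplitRound i cs (a + 1) b with
        | none =>
          simp only [pvCntA, pvCntB, List.countP_cons, hc, Prod.mk.injEq]
          simp
          omega
        | some p => rcases p with ⟨w, t⟩; cases w <;> rfl
    · by_cases hi : b + 1 = i
      · simp [pvSplitRound, hc, hi, pvStepC]
      · have hstep : pvStepC i (wa, wb, a, b) c = (wa, wb, a, b + 1) := by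
          simp [pvStepC, hc, hi]
        have hsr : pvSplitRound i (c :: cs) a b = pvSplitRound i cs a (b + 1) := by
          simp [pvSplitRound, hc, hi]
        have hrec := ih wa wb a (b + 1) ha (by omega)
        rw [List.foldl_cons, hstep, hsr, hrec]
        cases h2 : pvSplitRound i cs a (b + 1) with
        | none =>
          simp only [pvCntA, pvCntB, List.countP_cons, hc, Prod.mk.injEq]
          simp
          omega
        | some p => rcases p with ⟨w, t⟩; cases w <;> rfl

-- per-candidate-length i: A's whole scan agrees with B's round recursion
theorem pvScan_rounds (i : Int) (hi : 1 ≤ i) (l : List Char) (wa wb : Int) :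
    (match pvRoundsB i l wa wb with
     | some (wa', wb') => l.foldl (pvStepC i) (wa, wb, 0, 0) = (wa', wb', 0, 0)
     | none => ¬ ((l.foldl (pvStepC i) (wa, wb, 0, 0)).2.2.1 = 0 ∧
                  (l.foldl (pvStepC i) (wa, wb, 0, 0)).2.2.2 = 0)) := by
  fun_induction pvRoundsB i l wa wb with
  | case1 wa wb => simp
  | case2 rest wa wb hne h2 =>
    have hf := pvFold_split i rest wa wb 0 0 (by omega) (by omega)
    rw [h2] at hf
    simp only [hf]
    have ht := pvCnt_total rest
    have hlen : 0 < rest.length := List.length_pos_iff.mpr hne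
    have h0a : 0 ≤ pvCntA rest := by unfold pvCntA; positivity
    have h0b : 0 ≤ pvCntB rest := by unfold pvCntB; positivity
    simp only [not_and]
    intro hA hB
    simp only [zero_add] at hA hB
    omega
  | case3 rest wa wb hne t h2 ih =>
    have hf := pvFold_split i rest wa wb 0 0 (by omega) (by omega)
    rw [h2] at hf
    simp only [hf]
    exact ih
  | case4 rest wa wb hne t h2 ih =>
    have hf := pvFold_split i rest wa wb 0 0 (by omega) (by omega)
    rw [h2] at hf
    simp only [hf]
    exact ih

-- A's indexed inner loop over range(n) = a fold over the first n characters
theorem pvBridge (plays : String) (n i : Int) (init : Int × Int × Int × Int)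
    (hn0 : 0 ≤ n) (hlen : n ≤ (plays.toList.length : Int)) :
    (PySem.List.pyRange 0 n 1).foldl
        (fun s j => pvStepC i s (PySem.List.pyGetD plays.toList j ' ')) init =
      (plays.toList.take n.toNat).foldl (pvStepC i) init := by
  have hyslen : (plays.toList.take n.toNat).length = n.toNat := by
    rw [List.length_take]
    omega
  have hrange : PySem.List.pyRange 0 n 1 = PySem.List.pyRange 0 (PySem.List.len (plays.toList.take n.toNat)) 1 := by
    unfold PySem.List.len
    rw [hyslen]
    congr 1
    omega
  rw [hrange]
  rw [PySem.List.foldl_congr_mem _ _ (fun s j => pvStepC i s (PySem.List.pyGetD (plays.toList.take n.toNat) j ' ')) init ?_]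
  · exact PySem.List.foldl_pyRange_zero_pyGetD (plays.toList.take n.toNat) ' ' (pvStepC i) init
  · intro acc j hj
    rw [PySem.List.mem_pyRange_one] at hj
    unfold PySem.List.len at hj
    rw [hyslen] at hj
    have hj2 : j < (plays.toList.length : Int) := by omega
    have hjy : j < ((plays.toList.take n.toNat).length : Int) := by rw [hyslen]; omega
    simp only [PySem.List.pyGetD_eq_getElem _ ' ' hj.1 hj2,
        PySem.List.pyGetD_eq_getElem _ ' ' hj.1 hjy,
        List.getElem_take]

-- the two outer loops agree on any list of candidate lengths 1 ≤ i ≤ n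
theorem pvLoops_eq (plays : String) (n : Int) (hlen : n ≤ (plays.toList.length : Int)) :
    ∀ L : List Int, (∀ i ∈ L, 1 ≤ i ∧ i ≤ n) → pvLoopA plays n L = pvLoopB plays n L := by
  intro L
  induction L with
  | nil => intro _; rfl
  | cons i is ih =>
    intro hmem
    have hi := hmem i (List.mem_cons_self)
    have hn0 : 0 ≤ n := by omega
    have hih := ih (fun j hj => hmem j (List.mem_cons_of_mem _ hj))
    have hbridge := pvBridge plays n i (0, 0, 0, 0) hn0 hlen
    have hslice : PySem.List.slice plays.toList none (some n) = plays.toList.take n.toNat :=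
      PySem.List.slice_to plays.toList hn0
    have hs := pvScan_rounds i hi.1 (plays.toList.take n.toNat) 0 0
    simp only [pvLoopA, pvLoopB, hbridge, hslice]
    cases hr : pvRoundsB i (plays.toList.take n.toNat) 0 0 with
    | none =>
      rw [hr] at hs
      rw [if_neg hs]
      exact hih
    | some p =>
      rcases p with ⟨wa', wb'⟩
      rw [hr] at hs
      rw [hs]
      rw [if_pos (⟨rfl, rfl⟩ : ((wa', wb', (0 : Int), (0 : Int)).2.2.1 = 0 ∧ (wa', wb', (0 : Int), (0 : Int)).2.2.2 = 0))]
      show (if wa' > wb' ∧ PySem.List.pyGetD plays.toList (-1) ' ' = 'A' then "A"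
            else if wb' > wa' ∧ PySem.List.pyGetD plays.toList (-1) ' ' = 'B' then "B"
            else pvLoopA plays n is) =
           (if wa' > wb' ∧ PySem.List.pyGetD plays.toList (-1) ' ' = 'A' then "A"
            else if wb' > wa' ∧ PySem.List.pyGetD plays.toList (-1) ' ' = 'B' then "B"
            else pvLoopB plays n is)
      split_ifs <;> first | rfl | exact hih

-- ===== VERDICT (by name: the statement is the Claim_ definition above) =====
theorem determine_game_winner_spec : Claim_equal_determine_game_winner := by
  unfold Claim_equal_determine_game_winner
  intro n plays _ hpre
  unfold Spec_determine_game_winner determine_game_winner determine_game_winner_alt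
  exact pvLoops_eq plays n hpre _ (fun i hi => by
    rw [PySem.List.mem_pyRange_one] at hi
    omega)
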